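-- pv_equiv track=rewrite | github.com/alemar11/skills | plugins/gitstack/projects/ghflow/src/ghflow/checks.py | parse_available_fields
-- ===== SOURCE A (Python) =====
-- def parse_available_fields(message: str) -> list[str]:
--     if "Available fields:" not in message:
--         return []
--     fields: list[str] = []
--     in_block = False
--     for line in message.splitlines():
--         if "Available fields:" in line:
--             in_block = True
--             _, suffix = line.split(":", 1)
--             value = suffix.strip()
--             if value:
--                 fields.extend(field.strip() for field in value.split(",") if field.strip())
--             continue
--         if not in_block:
--             continue
--         value = line.strip()
--         if not value or value.startswith("Available fields:"):
--             continue
--         fields.append(value)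
--     return fields
-- ===== SOURCE B (Python) =====
-- MARKER = "Available fields:"
--
--
-- def _elem(line):
--     """Monoid element of one line: (fields if entered out-of-block,
--     fields if entered in-block, whether the line turns the block on)."""
--     if MARKER in line:
--         toks = [t for t in (f.strip() for f in line.split(":", 1)[1].strip().split(",")) if t]
--         return (toks, toks, True)
--     v = line.strip()
--     out = [v] if v else []
--     return ([], out, False)
--
--
-- def _combine(a, b):
--     return (a[0] + (b[1] if a[2] else b[0]), a[1] + b[1], a[2] or b[2])
--
--
-- def _reduce(lines):
--     """Divide-and-conquer reduction of the line monoid (depth O(log n))."""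
--     if not lines:
--         return ([], [], False)
--     if len(lines) == 1:
--         return _elem(lines[0])
--     mid = len(lines) // 2
--     return _combine(_reduce(lines[:mid]), _reduce(lines[mid:]))
--
--
-- def parse_available_fields(message: str) -> list[str]:
--     if MARKER not in message:
--         return []
--     return _reduce(message.splitlines())[0]
-- ===== Notes on version B (the rewrite author's own statement) =====
-- stated objective: alternative
-- what changed: Replaces A's sequential in_block state machine by a divide-and-conquer reduction over a state-transformer monoid: each line becomes a triple (fields-if-out-of-block, fields-if-in-block, sets-block?), halves are combined associatively, and the answer is the whole reduction's out-of-block component.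
import Mathlib
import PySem

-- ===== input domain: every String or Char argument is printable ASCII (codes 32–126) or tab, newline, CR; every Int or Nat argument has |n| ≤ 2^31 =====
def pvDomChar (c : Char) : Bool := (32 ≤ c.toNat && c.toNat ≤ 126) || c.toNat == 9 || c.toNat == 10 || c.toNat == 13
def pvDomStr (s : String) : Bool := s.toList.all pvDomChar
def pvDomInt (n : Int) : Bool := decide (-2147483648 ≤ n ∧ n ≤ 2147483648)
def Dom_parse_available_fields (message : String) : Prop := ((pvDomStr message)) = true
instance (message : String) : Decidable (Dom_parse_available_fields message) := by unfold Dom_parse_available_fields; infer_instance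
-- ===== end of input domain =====

-- B replaces A's sequential in_block state machine by a divide-and-conquer reduction over a
-- state-transformer monoid on the lines (objective: alternative algorithm, not claimed faster).

def pvMarker : String := "Available fields:"

-- ===== PORT A =====
-- one iteration of A's for-loop; state = (fields, in_block)
def pvAStep (st : List String × Bool) (line : String) : List String × Bool :=
  if PySem.Str.isIn pvMarker line then
    -- _, suffix = line.split(":", 1)   (a marker line always contains ':'; the defaults are unreachable)
    let suffix := ((PySem.Str.splitMax? line ":" 1).getD []).getD 1 ""
    let value := PySem.Str.strip suffix
    if value ≠ "" then
      (st.1 ++ (((PySem.Str.split? value ",").getD []).map PySem.Str.strip).filter (fun f => f ≠ ""), true)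
    else (st.1, true)
  else if st.2 = false then st
  else
    let value := PySem.Str.strip line
    if value = "" ∨ PySem.Str.startswith value pvMarker then st
    else (st.1 ++ [value], st.2)

def parse_available_fields (message : String) : List String :=
  if PySem.Str.isIn pvMarker message = false then []
  else ((PySem.Str.splitlines message).foldl pvAStep ([], false)).1

-- ===== PORT B =====
-- line.split(":", 1)[1] : the text after the first ':' ("" if there is none;
-- unreachable for marker lines, which always contain ':'); exact hand port via splitMax?
def pvAfterColon (line : String) : String :=
  match (PySem.Str.splitMax? line ":" 1).getD [] with
  | _ :: suffix :: _ => suffix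
  | _ => ""

-- the comma-separated stripped nonempty tokens of a marker line
def pvMarkerToks (line : String) : List String :=
  (((PySem.Str.split? (PySem.Str.strip (pvAfterColon line)) ",").getD []).map PySem.Str.strip).filter
    (fun f => f ≠ "")

-- monoid element of one line: (fields if entered out-of-block, fields if entered in-block, sets-block?)
def pvElem (line : String) : List String × List String × Bool :=
  if PySem.Str.isIn pvMarker line then
    let toks := pvMarkerToks line
    (toks, toks, true)
  else
    let v := PySem.Str.strip line
    let out := if v = "" then [] else [v]
    ([], out, false)

def pvCombine (a b : List String × List String × Bool) : List String × List String × Bool :=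
  (a.1 ++ (if a.2.2 then b.2.1 else b.1), a.2.1 ++ b.2.1, a.2.2 || b.2.2)

-- divide-and-conquer reduction of the line monoid
def pvReduce : List String → List String × List String × Bool
  | [] => ([], [], false)
  | [l] => pvElem l
  | l1 :: l2 :: rest =>
    pvCombine (pvReduce ((l1 :: l2 :: rest).take ((l1 :: l2 :: rest).length / 2)))
      (pvReduce ((l1 :: l2 :: rest).drop ((l1 :: l2 :: rest).length / 2)))
termination_by ls => ls.length
decreasing_by
  · simp; omega
  · simp; omega

def parse_available_fields_alt (message : String) : List String :=
  if PySem.Str.isIn pvMarker message = false then []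
  else (pvReduce (PySem.Str.splitlines message)).1

-- ===== PRECONDITION & SPEC =====
def Spec_parse_available_fields (message : String) (out : List String) : Prop := out = parse_available_fields_alt message
instance (message : String) (out : List String) : Decidable (Spec_parse_available_fields message out) := by unfold Spec_parse_available_fields; infer_instance

-- ===== CLAIM (what is proved, stated in full; the proofs are below) =====
def Claim_equal_parse_available_fields : Prop := ∀ (message : String), Dom_parse_available_fields message → Spec_parse_available_fields message (parse_available_fields message)

-- ===== LEMMAS AND PROOFS =====

-- rstrip is a prefix, lstrip a suffix, so strip is an infix of the original
theorem pv_rstrip_prefix (s : List Char) : PySem.Chars.rstrip s <+: s := by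
  simp only [PySem.Chars.rstrip]
  obtain ⟨t, ht⟩ := List.dropWhile_suffix (l := s.reverse) PySem.Chars.isspace
  exact ⟨t.reverse, by rw [← List.reverse_append, ht, List.reverse_reverse]⟩

theorem pv_lstrip_suffix (s : List Char) : PySem.Chars.lstrip s <:+ s := by
  simp only [PySem.Chars.lstrip]
  exact List.dropWhile_suffix PySem.Chars.isspace

theorem pv_strip_infix (s : List Char) : PySem.Chars.strip s <:+: s := by
  simp only [PySem.Chars.strip]
  exact (pv_rstrip_prefix _).isInfix.trans (pv_lstrip_suffix s).isInfix

-- a line whose stripped form starts with the marker contains the marker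
theorem pv_startswith_strip_isIn (line : String)
    (h : PySem.Str.startswith (PySem.Str.strip line) pvMarker = true) :
    PySem.Str.isIn pvMarker line = true := by
  rw [PySem.Str.isIn_iff_infix]
  have h' : pvMarker.toList <+: (PySem.Str.strip line).toList := by
    have := PySem.Str.startswith_eq (PySem.Str.strip line) pvMarker
    rw [this, PySem.Chars.startswith_iff] at h
    exact h
  rw [PySem.Str.toList_strip] at h'
  exact h'.isInfix.trans (pv_strip_infix line.toList)

-- the comma tokens of the empty string are []
theorem pv_tokens_empty :
    (((PySem.Str.split? "" ",").getD []).map PySem.Str.strip).filter (fun f => f ≠ "") = [] := by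
  decide

-- one A-step realises the line's monoid element
theorem pv_step_elem (acc : List String) (b : Bool) (line : String) :
    pvAStep (acc, b) line =
      (acc ++ (if b then (pvElem line).2.1 else (pvElem line).1), b || (pvElem line).2.2) := by
  by_cases h : PySem.Str.isIn pvMarker line = true
  · have he : pvElem line = (pvMarkerToks line, pvMarkerToks line, true) := by
      simp only [pvElem, h, if_pos]
    rw [he, pvAStep.eq_def, if_pos h]
    have hsuf : ((PySem.Str.splitMax? line ":" 1).getD []).getD 1 "" = pvAfterColon line := by
      unfold pvAfterColon
      rcases (PySem.Str.splitMax? line ":" 1).getD [] with _ | ⟨x, _ | ⟨y, t⟩⟩ <;> rfl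
    rw [hsuf]
    by_cases hv : PySem.Str.strip (pvAfterColon line) = ""
    · rw [if_neg (by simp [hv])]
      have ht : pvMarkerToks line = [] := by
        unfold pvMarkerToks; rw [hv]; exact pv_tokens_empty
      rw [ht]
      cases b <;> simp
    · rw [if_pos hv]
      have ht : (((PySem.Str.split? (PySem.Str.strip (pvAfterColon line)) ",").getD []).map
          PySem.Str.strip).filter (fun f => f ≠ "") = pvMarkerToks line := rfl
      rw [ht]
      cases b <;> simp
  · rw [Bool.not_eq_true] at h
    have he : pvElem line =
        ([], (if PySem.Str.strip line = "" then [] else [PySem.Str.strip line]), false) := by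
      simp only [pvElem, h, Bool.false_eq_true, if_false]
    rw [he, pvAStep.eq_def, if_neg (by simp only [h]; decide)]
    cases b with
    | false => simp
    | true =>
      simp only [Bool.true_eq_false, if_false, if_true, Bool.true_or]
      by_cases hv : PySem.Str.strip line = ""
      · simp [hv]
      · have hsw : PySem.Str.startswith (PySem.Str.strip line) pvMarker = false := by
          by_contra hc
          rw [Bool.not_eq_false] at hc
          rw [pv_startswith_strip_isIn line hc] at h
          exact absurd h (by simp)
        rw [PySem.Str.startswith_eq, PySem.Str.toList_strip] at hsw
        simp [hv, hsw]

-- A's fold over any list of lines computes the monoid reduction of those lines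
theorem pv_fold_reduce (ls : List String) : ∀ (acc : List String) (b : Bool),
    ls.foldl pvAStep (acc, b) =
      (acc ++ (if b then (pvReduce ls).2.1 else (pvReduce ls).1), b || (pvReduce ls).2.2) := by
  induction ls using pvReduce.induct with
  | case1 => intro acc b; simp [pvReduce]
  | case2 l =>
    intro acc b
    simp only [List.foldl_cons, List.foldl_nil, pv_step_elem, pvReduce]
  | case3 l1 l2 rest ih1 ih2 =>
    intro acc b
    have hsplit : (l1 :: l2 :: rest) =
        (l1 :: l2 :: rest).take ((l1 :: l2 :: rest).length / 2) ++
        (l1 :: l2 :: rest).drop ((l1 :: l2 :: rest).length / 2) := (List.take_append_drop _ _).symm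
    rw [pvReduce]
    conv_lhs => rw [hsplit]
    rw [List.foldl_append, ih1, ih2]
    simp only [pvCombine]
    rcases b with _ | _ <;>
      rcases hs1 : ((pvReduce ((l1 :: l2 :: rest).take ((l1 :: l2 :: rest).length / 2))).2.2) with _ | _ <;>
      simp [List.append_assoc]

-- ===== VERDICT (by name: the statement is the Claim_ definition above) =====
theorem parse_available_fields_spec : Claim_equal_parse_available_fields := by
  intro message _
  unfold Spec_parse_available_fields parse_available_fields parse_available_fields_alt
  by_cases hg : PySem.Str.isIn pvMarker message = false
  · simp only [if_pos hg]
  · simp only [if_neg hg]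
    rw [pv_fold_reduce]
    simp
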